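-- pv_equiv track=rewrite | github.com/nalangekrushna/comprinno_test | 3.py | find_valid_land_strip
-- ===== SOURCE A (Python) =====
-- def find_valid_land_strip(inputs) :
--     results = []
--     for lst in inputs :
--         # if length of lst is even or land didn't start from 1 then didn't satisfy constraints.
--         if lst[0] != 1 or len(lst) % 2 == 0 :
--             results.append('no')
--         else :
--             middle = (len(lst) // 2)
--             for i in range(len(lst)-1) :
--                 if i < middle :
--                     # upto centre right value ie. next element should be greter than prev element.
--                     if lst[i+1]-lst[i] != 1 :
--                         results.append('no')
--                         break
--                 else :
--                     # after centre left value ie. prev element should be greter than next element.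
--                     if lst[i]-lst[i+1] != 1 :
--                         results.append('no')
--                         break
--             else :
--                 # if all constraints are satisfied then return yes.
--                 results.append('yes')
--     return results
-- ===== SOURCE B (Python) =====
-- def find_valid_land_strip(inputs):
--     def expected(n):
--         m = n // 2
--         return list(range(1, m + 2)) + list(range(m, 0, -1))
--     return ['yes' if lst == expected(len(lst)) else 'no' for lst in inputs]
-- ===== Notes on version B (the rewrite author's own statement) =====
-- stated objective: simpler
-- what changed: B builds the unique valid pyramid reference list for each input length and does one equality comparison, instead of A's index-position-dependent difference scan with early break.
import Mathlib
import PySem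

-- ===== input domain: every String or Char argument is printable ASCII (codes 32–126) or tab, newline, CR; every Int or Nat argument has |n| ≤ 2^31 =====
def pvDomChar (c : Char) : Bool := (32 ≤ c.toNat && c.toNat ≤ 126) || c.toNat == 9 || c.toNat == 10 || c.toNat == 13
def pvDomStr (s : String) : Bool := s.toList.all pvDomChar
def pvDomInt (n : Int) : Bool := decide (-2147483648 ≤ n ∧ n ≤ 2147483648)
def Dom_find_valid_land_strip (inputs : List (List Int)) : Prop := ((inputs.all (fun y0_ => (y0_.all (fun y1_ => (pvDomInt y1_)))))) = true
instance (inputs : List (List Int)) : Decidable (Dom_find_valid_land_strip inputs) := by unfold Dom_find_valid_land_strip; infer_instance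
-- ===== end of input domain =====

-- B replaces A's index-position-dependent difference scan by constructing the unique
-- valid pyramid list for the input's length and one equality comparison (objective: simpler).

-- ===== PORT A =====
-- the inner 'for i in range(len(lst)-1)' loop with its break / for-else
def pvLoopA (lst : List Int) (middle : Int) : List Int → String
  | [] => "yes"
  | i :: rest =>
    if i < middle then
      if PySem.List.pyGetD lst (i+1) 0 - PySem.List.pyGetD lst i 0 ≠ 1 then "no"
      else pvLoopA lst middle rest
    else
      if PySem.List.pyGetD lst i 0 - PySem.List.pyGetD lst (i+1) 0 ≠ 1 then "no"
      else pvLoopA lst middle rest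

def find_valid_land_strip (inputs : List (List Int)) : List String :=
  inputs.foldl (fun results lst =>
    if PySem.List.pyGetD lst 0 0 ≠ 1 ∨ lst.length % 2 = 0 then results ++ ["no"]
    else results ++ [pvLoopA lst (PySem.Int.floordiv (lst.length : Int) 2)
                      (PySem.List.pyRange 0 ((lst.length : Int) - 1) 1)]) []

-- ===== PORT B =====
def pvExpected (n : Nat) : List Int :=
  let m := PySem.Int.floordiv (n : Int) 2
  PySem.List.pyRange 1 (m + 2) 1 ++ PySem.List.pyRange m 0 (-1)

def find_valid_land_strip_alt (inputs : List (List Int)) : List String :=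
  inputs.map (fun lst => if lst = pvExpected lst.length then "yes" else "no")

-- ===== PRECONDITION & SPEC =====
-- Pre_ excludes inputs containing an empty inner list, on which A raises IndexError at lst[0].
def Pre_find_valid_land_strip (inputs : List (List Int)) : Prop := ∀ lst ∈ inputs, lst ≠ []
instance (inputs : List (List Int)) : Decidable (Pre_find_valid_land_strip inputs) := by unfold Pre_find_valid_land_strip; infer_instance
def pvWitness_find_valid_land_strip : List (List Int) := [[1], [1, 2, 1], [2, 3]]

def Spec_find_valid_land_strip (inputs : List (List Int)) (out : List String) : Prop := out = find_valid_land_strip_alt inputs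
instance (inputs : List (List Int)) (out : List String) : Decidable (Spec_find_valid_land_strip inputs out) := by unfold Spec_find_valid_land_strip; infer_instance

-- ===== CLAIM (what is proved, stated in full; the proofs are below) =====
def Claim_equal_find_valid_land_strip : Prop := ∀ (inputs : List (List Int)), Dom_find_valid_land_strip inputs → Pre_find_valid_land_strip inputs → Spec_find_valid_land_strip inputs (find_valid_land_strip inputs)

-- ===== LEMMAS AND PROOFS =====

-- value at position j of the valid pyramid of (odd) length 2*m+1
def pvPyr (m j : Nat) : Int := if j ≤ m then (j : Int) + 1 else 2 * (m : Int) + 1 - j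

lemma pvPyr_le (m j : Nat) (h : j ≤ m) : pvPyr m j = (j : Int) + 1 := by
  simp [pvPyr, h]

lemma pvPyr_ge (m j : Nat) (h : m ≤ j) : pvPyr m j = 2 * (m : Int) + 1 - (j : Int) := by
  by_cases h' : j ≤ m
  · have hjm : j = m := le_antisymm h' h
    subst hjm
    simp [pvPyr]
    omega
  · simp [pvPyr, h']

-- the A-side per-index condition ("the scan does not break at index i")
def pvOk (lst : List Int) (middle i : Int) : Bool :=
  if i < middle then PySem.List.pyGetD lst (i+1) 0 - PySem.List.pyGetD lst i 0 = 1
  else PySem.List.pyGetD lst i 0 - PySem.List.pyGetD lst (i+1) 0 = 1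

lemma pvMid (n : Nat) : PySem.Int.floordiv (n : Int) 2 = ((n / 2 : Nat) : Int) := by
  exact_mod_cast PySem.Int.floordiv_natCast n 2

lemma pvLoopA_eq (lst : List Int) (middle : Int) (is : List Int) :
    pvLoopA lst middle is = if ∀ i ∈ is, pvOk lst middle i = true then "yes" else "no" := by
  induction is with
  | nil => simp [pvLoopA]
  | cons i rest ih =>
    simp only [pvLoopA, ih, pvOk, List.mem_cons, forall_eq_or_imp]
    split_ifs <;> simp_all

lemma pvExpected_eq (m : Nat) :
    pvExpected (2 * m + 1) = (List.range (2 * m + 1)).map (pvPyr m) := by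
  have hmid : (2 * m + 1) / 2 = m := by omega
  simp only [pvExpected, pvMid, hmid]
  rw [PySem.List.pyRange_one, PySem.List.pyRange_neg_one]
  have h1 : ((m : Int) + 2 - 1).toNat = m + 1 := by omega
  have h2 : ((m : Int) - 0).toNat = m := by omega
  rw [h1, h2]
  conv_rhs => rw [show 2 * m + 1 = (m + 1) + m from by omega, List.range_add, List.map_append,
      List.map_map]
  congr 1 <;>
    · apply List.map_congr_left
      intro k hk
      simp only [List.mem_range] at hk
      simp only [Function.comp, pvPyr]
      split_ifs <;> push_cast <;> omega

lemma pvExpected_length (n : Nat) : (pvExpected n).length = 2 * (n / 2) + 1 := by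
  simp only [pvExpected, pvMid]
  rw [List.length_append, PySem.List.length_pyRange_one, PySem.List.length_pyRange_neg_one]
  omega

lemma pvExpected_get0 (n : Nat) : PySem.List.pyGetD (pvExpected n) 0 0 = 1 := by
  simp only [pvExpected, pvMid]
  rw [PySem.List.pyRange_one_cons (by omega)]
  rw [show (0 : Int) = ((0 : Nat) : Int) from rfl, PySem.List.pyGetD_natCast]
  simp

lemma pv_scan_iff (lst : List Int) (m : Nat) (hlen : lst.length = 2 * m + 1)
    (h0 : PySem.List.pyGetD lst 0 0 = 1) :
    (∀ i ∈ PySem.List.pyRange 0 ((lst.length : Int) - 1) 1, pvOk lst (m : Int) i = true) ↔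
      lst = (List.range (2 * m + 1)).map (pvPyr m) := by
  have hup : ((lst.length : Int) - 1) = (2 * m : Int) := by rw [hlen]; push_cast; ring
  rw [hup]
  have h0' : lst.getD 0 0 = 1 := by
    rw [show (0 : Int) = ((0 : Nat) : Int) from rfl, PySem.List.pyGetD_natCast] at h0
    exact h0
  constructor
  · intro h
    have key : ∀ j : Nat, j ≤ 2 * m → lst.getD j 0 = pvPyr m j := by
      intro j
      induction j with
      | zero => intro _; simpa [pvPyr] using h0'
      | succ j ih =>
        intro hj
        have hprev := ih (by omega)
        have hi : ((j : Nat) : Int) ∈ PySem.List.pyRange 0 (2 * m : Int) 1 := by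
          rw [PySem.List.mem_pyRange_one]
          constructor <;> omega
        have hc := h _ hi
        have e1 : ((j : Nat) : Int) + 1 = ((j + 1 : Nat) : Int) := by push_cast; ring
        simp only [pvOk, e1, PySem.List.pyGetD_natCast] at hc
        rw [hprev] at hc
        by_cases hjm : j < m
        · rw [if_pos (by exact_mod_cast hjm), pvPyr_le m j (by omega), decide_eq_true_eq] at hc
          rw [pvPyr_le m (j+1) (by omega)]
          push_cast at hc ⊢
          omega
        · rw [if_neg (by exact_mod_cast hjm), pvPyr_ge m j (by omega), decide_eq_true_eq] at hc
          rw [pvPyr_ge m (j+1) (by omega)]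
          push_cast at hc ⊢
          omega
    apply List.ext_getElem
    · simp [hlen]
    · intro i h1 h2
      have hi : i ≤ 2 * m := by omega
      have := key i hi
      rw [List.getD_eq_getElem lst 0 h1] at this
      simpa using this
  · intro h i hi
    rw [PySem.List.mem_pyRange_one] at hi
    obtain ⟨hi0, hi2⟩ := hi
    have hij : i = ((i.toNat : Nat) : Int) := by omega
    have hjlt : i.toNat < 2 * m := by omega
    rw [hij]
    have e1 : ((i.toNat : Nat) : Int) + 1 = ((i.toNat + 1 : Nat) : Int) := by push_cast; ring
    simp only [pvOk, e1, PySem.List.pyGetD_natCast]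
    have g1 : lst.getD i.toNat 0 = pvPyr m i.toNat := by
      rw [h]; exact PySem.List.getD_map_range _ _ _ _ (by omega)
    have g2 : lst.getD (i.toNat + 1) 0 = pvPyr m (i.toNat + 1) := by
      rw [h]; exact PySem.List.getD_map_range _ _ _ _ (by omega)
    by_cases hjm : i.toNat < m
    · rw [if_pos (by exact_mod_cast hjm), decide_eq_true_eq, g1, g2,
        pvPyr_le m i.toNat (by omega), pvPyr_le m (i.toNat + 1) (by omega)]
      push_cast
      ring
    · rw [if_neg (by exact_mod_cast hjm), decide_eq_true_eq, g1, g2,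
        pvPyr_ge m i.toNat (by omega), pvPyr_ge m (i.toNat + 1) (by omega)]
      push_cast
      ring

lemma pvRow (lst : List Int) (_h : lst ≠ []) :
    (if PySem.List.pyGetD lst 0 0 ≠ 1 ∨ lst.length % 2 = 0 then "no"
     else pvLoopA lst (PySem.Int.floordiv (lst.length : Int) 2)
            (PySem.List.pyRange 0 ((lst.length : Int) - 1) 1)) =
    (if lst = pvExpected lst.length then "yes" else "no") := by
  by_cases hguard : PySem.List.pyGetD lst 0 0 ≠ 1 ∨ lst.length % 2 = 0
  · rw [if_pos hguard, if_neg]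
    intro hEq
    rcases hguard with h1 | h2
    · exact h1 (by rw [hEq]; exact pvExpected_get0 lst.length)
    · have := congrArg List.length hEq
      rw [pvExpected_length] at this
      omega
  · have h0 : PySem.List.pyGetD lst 0 0 = 1 := by
      by_contra hx
      exact hguard (Or.inl hx)
    have hodd : lst.length % 2 ≠ 0 := fun hx => hguard (Or.inr hx)
    rw [if_neg hguard]
    set m := lst.length / 2 with hm
    have hlen : lst.length = 2 * m + 1 := by omega
    have hmid : PySem.Int.floordiv (lst.length : Int) 2 = (m : Int) := by
      rw [pvMid]
    rw [hmid, pvLoopA_eq]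
    have hiff := pv_scan_iff lst m hlen h0
    have hexp : pvExpected lst.length = (List.range (2 * m + 1)).map (pvPyr m) := by
      rw [hlen, pvExpected_eq]
    rw [hexp]
    by_cases hc : lst = (List.range (2 * m + 1)).map (pvPyr m)
    · rw [if_pos (hiff.mpr hc), if_pos hc]
    · rw [if_neg (fun hall => hc (hiff.mp hall)), if_neg hc]

-- ===== VERDICT (by name: the statement is the Claim_ definition above) =====
theorem find_valid_land_strip_spec : Claim_equal_find_valid_land_strip := by
  intro inputs _ hpre
  unfold Spec_find_valid_land_strip find_valid_land_strip find_valid_land_strip_alt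
  have hfun : (fun (results : List String) (lst : List Int) =>
      if PySem.List.pyGetD lst 0 0 ≠ 1 ∨ lst.length % 2 = 0 then results ++ ["no"]
      else results ++ [pvLoopA lst (PySem.Int.floordiv (lst.length : Int) 2)
                        (PySem.List.pyRange 0 ((lst.length : Int) - 1) 1)]) =
      (fun (results : List String) (lst : List Int) =>
        results ++ [if PySem.List.pyGetD lst 0 0 ≠ 1 ∨ lst.length % 2 = 0 then "no"
          else pvLoopA lst (PySem.Int.floordiv (lst.length : Int) 2)
                        (PySem.List.pyRange 0 ((lst.length : Int) - 1) 1)]) := by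
    funext r l; split_ifs <;> rfl
  rw [hfun, PySem.List.foldl_append_singleton_eq_map, List.nil_append]
  apply List.map_congr_left
  intro lst hmem
  exact pvRow lst (hpre lst hmem)
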